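-- pv_equiv track=rewrite | github.com/shunita/tedibert | contra/tests/test_clinical_code_from_notes.py | collect_sentences_in_batch
-- ===== SOURCE A (Python) =====
-- def collect_sentences_in_batch(list_of_sent_lists):
--     indexes = []
--     texts = []
--     index = 0
--     max_len = 0
--     for sent_list in list_of_sent_lists:
--         # sample is a list of sentences
--         indexes.append((index, index + len(sent_list)))
--         index += len(sent_list)
--         texts.extend(sent_list)
--         if max_len < len(sent_list):
--             max_len = len(sent_list)
--     return indexes, texts, max_len
-- ===== SOURCE B (Python) =====
-- def _starts(start, lengths):
--     # index boundaries starting at `start`: one entry per prefix sum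
--     if not lengths:
--         return [start]
--     return [start] + _starts(start + lengths[0], lengths[1:])
--
--
-- def collect_sentences_in_batch(list_of_sent_lists):
--     lengths = [len(s) for s in list_of_sent_lists]
--     starts = _starts(0, lengths)
--     indexes = list(zip(starts, starts[1:]))
--     texts = [sent for sl in list_of_sent_lists for sent in sl]
--     return indexes, texts, max(lengths, default=0)
-- ===== Notes on version B (the rewrite author's own statement) =====
-- stated objective: idiomatic
-- what changed: Replaces the single four-accumulator loop by a lengths table: a prefix-sum starts list zipped with its tail gives the index pairs, a flattening comprehension gives the texts, and max(lengths, default=0) gives the maximum.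
import Mathlib
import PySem

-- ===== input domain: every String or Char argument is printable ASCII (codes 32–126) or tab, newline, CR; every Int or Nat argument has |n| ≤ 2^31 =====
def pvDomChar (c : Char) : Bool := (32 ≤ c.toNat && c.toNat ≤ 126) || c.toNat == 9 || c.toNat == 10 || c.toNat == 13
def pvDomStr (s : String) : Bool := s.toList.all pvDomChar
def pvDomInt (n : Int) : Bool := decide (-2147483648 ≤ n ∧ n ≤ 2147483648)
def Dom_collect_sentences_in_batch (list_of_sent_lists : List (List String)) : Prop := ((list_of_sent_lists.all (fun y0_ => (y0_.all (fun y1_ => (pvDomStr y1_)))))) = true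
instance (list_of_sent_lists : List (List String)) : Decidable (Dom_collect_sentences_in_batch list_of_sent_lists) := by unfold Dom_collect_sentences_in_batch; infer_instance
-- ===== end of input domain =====

-- B replaces A's four-accumulator loop by a lengths table: prefix-sum starts zipped
-- with its tail, a flattening pass for the texts, and max with default 0 (idiomatic).

-- ===== PORT A =====
def collect_sentences_in_batch (list_of_sent_lists : List (List String)) : (List (Int × Int)) × List String × Int :=
  let st := list_of_sent_lists.foldl
    (fun (st : (List (Int × Int)) × List String × Int × Int) sent_list =>
      let indexes := st.1
      let texts := st.2.1
      let index := st.2.2.1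
      let max_len := st.2.2.2
      let n : Int := sent_list.length
      (indexes ++ [(index, index + n)], texts ++ sent_list, index + n,
       if max_len < n then n else max_len))
    ([], [], 0, 0)
  (st.1, st.2.1, st.2.2.2)

-- ===== PORT B =====
-- helper _starts of Source B
def pvStarts (start : Int) : List Int → List Int
  | [] => [start]
  | n :: rest => start :: pvStarts (start + n) rest

def collect_sentences_in_batch_alt (list_of_sent_lists : List (List String)) : (List (Int × Int)) × List String × Int :=
  let lengths : List Int := list_of_sent_lists.map (fun s => (s.length : Int))
  let starts := pvStarts 0 lengths
  let indexes := starts.zip starts.tail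
  let texts := list_of_sent_lists.flatMap (fun sl => sl)
  (indexes, texts, (PySem.List.max? lengths (fun x => x)).getD 0)

-- ===== PRECONDITION & SPEC =====
def Spec_collect_sentences_in_batch (list_of_sent_lists : List (List String)) (out : (List (Int × Int)) × List String × Int) : Prop := out = collect_sentences_in_batch_alt list_of_sent_lists
instance (list_of_sent_lists : List (List String)) (out : (List (Int × Int)) × List String × Int) : Decidable (Spec_collect_sentences_in_batch list_of_sent_lists out) := by unfold Spec_collect_sentences_in_batch; infer_instance

-- ===== CLAIM (what is proved, stated in full; the proofs are below) =====
def Claim_equal_collect_sentences_in_batch : Prop := ∀ (list_of_sent_lists : List (List String)), Dom_collect_sentences_in_batch list_of_sent_lists → Spec_collect_sentences_in_batch list_of_sent_lists (collect_sentences_in_batch list_of_sent_lists)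

-- ===== LEMMAS AND PROOFS =====

-- generalized description of A's fold from an arbitrary state
theorem foldA_eq (l : List (List String)) (idx : List (Int × Int)) (txt : List String) (i m : Int) :
    l.foldl
      (fun (st : (List (Int × Int)) × List String × Int × Int) sent_list =>
        let indexes := st.1
        let texts := st.2.1
        let index := st.2.2.1
        let max_len := st.2.2.2
        let n : Int := sent_list.length
        (indexes ++ [(index, index + n)], texts ++ sent_list, index + n,
         if max_len < n then n else max_len))
      (idx, txt, i, m)
    = (idx ++ (pvStarts i (l.map (fun s => (s.length : Int)))).zip
          (pvStarts i (l.map (fun s => (s.length : Int)))).tail,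
       txt ++ l.flatMap (fun sl => sl),
       i + (l.map (fun s => (s.length : Int))).sum,
       (l.map (fun s => (s.length : Int))).foldl (fun a n => if a < n then n else a) m) := by
  induction l generalizing idx txt i m with
  | nil => simp [pvStarts]
  | cons hd tl ih =>
      simp only [List.foldl_cons, List.map_cons, List.flatMap_cons, pvStarts]
      rw [ih]
      cases tl with
      | nil => simp [pvStarts]
      | cons a b =>
          simp [pvStarts, List.append_assoc, add_assoc, List.sum_cons]

theorem maxfold_eq (L : List Int) (h : ∀ x ∈ L, 0 ≤ x) :
    L.foldl (fun a n => if a < n then n else a) 0 = (PySem.List.max? L (fun x => x)).getD 0 := by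
  cases L with
  | nil => simp [PySem.List.max?]
  | cons x t =>
      rw [PySem.List.max?_id_cons]
      simp only [Option.getD_some, List.foldl_cons]
      have key : ∀ (t : List Int) (a b : Int), a ≤ b →
          t.foldl (fun a n => if a < n then n else a) b = t.foldl max b := by
        intro t
        induction t with
        | nil => intro a b _; rfl
        | cons y s ih =>
            intro a b hab
            simp only [List.foldl_cons]
            by_cases hy : b < y
            · simp only [if_pos hy, max_eq_right (le_of_lt hy)]
              exact ih y y le_rfl
            · simp only [if_neg hy]
              rw [max_eq_left (le_of_not_gt hy)]
              exact ih a b hab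
      have hx : (if (0:Int) < x then x else 0) = max 0 x := by
        by_cases h0 : (0:Int) < x
        · simp [h0, max_eq_right (le_of_lt h0)]
        · simp [h0, max_eq_left (le_of_not_gt h0)]
      rw [hx, max_eq_right (h x (by simp))]
      exact key t x x le_rfl

-- ===== VERDICT (by name: the statement is the Claim_ definition above) =====
theorem collect_sentences_in_batch_spec : Claim_equal_collect_sentences_in_batch := by
  intro l _
  unfold Spec_collect_sentences_in_batch collect_sentences_in_batch collect_sentences_in_batch_alt
  simp only [foldA_eq, List.nil_append, zero_add]
  rw [maxfold_eq _ (by intro x hx; simp at hx; obtain ⟨s, _, rfl⟩ := hx; positivity)]
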